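-- pv_equiv track=rewrite | github.com/MyNameIsTrez/Advent-Of-Code-2021 | code/11a.py | flash_all
-- ===== SOURCE A (Python) =====
-- def flash_all(data, width, height, world):
-- 	flashed = [[False] * width for _ in range(height)]
--
-- 	stack = []
--
-- 	for point in world:
-- 		stack.append(point)
--
-- 	flashes = 0
--
-- 	while len(stack) > 0:
-- 		x, y = stack.pop()
--
-- 		# data[y][x]
-- 		if (x, y) in world and not flashed[y][x]:
-- 			data[y][x] += 1
--
-- 			if data[y][x] > 9:
-- 				flashed[y][x] = True
-- 				data[y][x] = 0
-- 				flashes += 1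
--
-- 				stack.append((x-1, y-1))
-- 				stack.append((x  , y-1))
-- 				stack.append((x+1, y-1))
--
-- 				stack.append((x-1, y  ))
-- 				stack.append((x+1, y  ))
--
-- 				stack.append((x-1, y+1))
-- 				stack.append((x  , y+1))
-- 				stack.append((x+1, y+1))
--
-- 	return flashes
-- ===== SOURCE B (Python) =====
-- def flash_all(data, width, height, world):
-- 	# Pass-based fixpoint instead of an explicit stack; 'world' membership via a set built once.
-- 	wset = set(world)
-- 	for (x, y) in world:
-- 		data[y][x] += 1
-- 	flashed = set()
-- 	flashes = 0
-- 	changed = True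
-- 	while changed:
-- 		changed = False
-- 		for (x, y) in world:
-- 			if (x, y) not in flashed and data[y][x] > 9:
-- 				flashed.add((x, y))
-- 				flashes += 1
-- 				changed = True
-- 				for dx in (-1, 0, 1):
-- 					for dy in (-1, 0, 1):
-- 						if dx or dy:
-- 							n = (x + dx, y + dy)
-- 							if n in wset and n not in flashed:
-- 								data[n[1]][n[0]] += 1
-- 	for (x, y) in flashed:
-- 		data[y][x] = 0
-- 	return flashes
-- ===== Notes on version B (the rewrite author's own statement) =====
-- stated objective: faster
-- what changed: Replaces A's LIFO-stack cascade with repeated full passes over world that flash every ready not-yet-flashed cell until a pass produces no new flash, and tests world membership against a set built once instead of A's per-pop linear scan of the world list.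
-- outside the precondition, e.g. on flash_all([[1]], 1, 1, {(0, -1)}): A returns 0, B returns 0; on flash_all([[9]], 1, 1, {(0, -1), (0, 0)}): A returns 1, B returns 2
import Mathlib
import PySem

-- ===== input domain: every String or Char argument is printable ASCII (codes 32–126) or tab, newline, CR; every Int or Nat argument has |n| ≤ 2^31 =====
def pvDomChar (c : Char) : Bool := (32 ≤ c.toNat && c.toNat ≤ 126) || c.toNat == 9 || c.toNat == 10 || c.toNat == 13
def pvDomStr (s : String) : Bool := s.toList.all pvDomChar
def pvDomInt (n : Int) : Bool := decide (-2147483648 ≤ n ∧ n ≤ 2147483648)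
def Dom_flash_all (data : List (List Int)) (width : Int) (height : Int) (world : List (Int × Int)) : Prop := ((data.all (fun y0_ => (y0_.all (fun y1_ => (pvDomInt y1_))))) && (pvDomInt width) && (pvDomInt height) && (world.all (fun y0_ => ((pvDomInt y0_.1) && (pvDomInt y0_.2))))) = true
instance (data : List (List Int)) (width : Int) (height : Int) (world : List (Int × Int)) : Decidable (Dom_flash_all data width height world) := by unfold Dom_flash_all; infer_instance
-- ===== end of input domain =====

-- B replaces A's LIFO-stack cascade by repeated full passes that flash every ready cell until none
-- is left (world membership via a set built once); both mutate `data` identically in Python, and the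
-- equivalence proved here is about the RETURN value (the flash count).


-- ===== PORT A =====
-- shared 2-d indexing helpers (Python `m[y][x]` semantics, incl. negative in-range indices;
-- `set2` is only reached after the corresponding read succeeded, exactly as in the Python sources)
def get2 {α : Type} (m : List (List α)) (y x : Int) : Option α :=
  (PySem.List.pyGet? m y).bind (fun row => PySem.List.pyGet? row x)

def set2 {α : Type} (m : List (List α)) (y x : Int) (v : α) : List (List α) :=
  match PySem.List.pyIdx? m.length y with
  | none => m
  | some j =>
    match m[j]? with
    | none => m
    | some row =>
      match PySem.List.pyIdx? row.length x with
      | none => m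
      | some k => m.set j (row.set k v)

-- the 8 neighbour pushes of A, in POP order (the stack is represented top-at-head)
def nbrsPushA (x y : Int) : List (Int × Int) :=
  [(x+1,y+1),(x,y+1),(x-1,y+1),(x+1,y),(x-1,y),(x+1,y-1),(x,y-1),(x-1,y-1)]

-- termination helpers for the two loops
theorem pv_pyIdx?_lt {n : Nat} {i : Int} {k : Nat}
    (h : PySem.List.pyIdx? n i = some k) : k < n := by
  simp only [PySem.List.pyIdx?] at h
  split at h <;> split at h <;> simp_all <;> omega

theorem pv_filter_length_lt {α : Type} {l : List α} {p q : α → Bool}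
    (hmono : ∀ a ∈ l, q a = true → p a = true) {a : α} (ha : a ∈ l)
    (hp : p a = true) (hq : q a = false) :
    (l.filter q).length < (l.filter p).length := by
  have key : l.countP q < l.countP p := by
    obtain ⟨s, t, rfl⟩ := List.append_of_mem ha
    have hs := List.countP_mono_left (p := q) (q := p) (l := s)
      (fun x hx h => hmono x (by simp [hx]) h)
    have ht := List.countP_mono_left (p := q) (q := p) (l := t)
      (fun x hx h => hmono x (by simp [hx]) h)
    simp [List.countP_append, List.countP_cons, hp, hq]
    omega
  simpa only [← List.countP_eq_length_filter] using key

theorem pv_get2_set2_self {α : Type} {m : List (List α)} {y x : Int} {a : α} (v : α)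
    (h : get2 m y x = some a) : get2 (set2 m y x v) y x = some v := by
  simp only [get2, PySem.List.pyGet?, Option.bind_eq_some_iff] at h
  obtain ⟨row, ⟨j, hj, hrow⟩, k, hk, hval⟩ := h
  have hjlt : j < m.length := (List.getElem?_eq_some_iff.1 hrow).1
  have hklt : k < row.length := (List.getElem?_eq_some_iff.1 hval).1
  simp only [set2, hj, hrow, hk]
  simp only [get2, PySem.List.pyGet?, List.length_set, hj, Option.bind_eq_some_iff]
  refine ⟨row.set k v, ⟨j, rfl, ?_⟩, k, ?_, ?_⟩
  · simp [List.getElem?_set, hjlt]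
  · simp [List.length_set, hk]
  · simp [List.getElem?_set, hklt]

theorem pv_get2_set2_mono {α : Type} {m : List (List α)} {y x : Int} (v : α)
    {y' x' : Int} {w : α} (h : get2 (set2 m y x v) y' x' = some w) (hw : w ≠ v) :
    get2 m y' x' = some w := by
  rcases hj : PySem.List.pyIdx? m.length y with _ | j
  · simpa [set2, hj] using h
  rcases hrow : m[j]? with _ | row
  · simpa [set2, hj, hrow] using h
  rcases hk : PySem.List.pyIdx? row.length x with _ | k
  · simpa [set2, hj, hrow, hk] using h
  have hm' : set2 m y x v = m.set j (row.set k v) := by simp [set2, hj, hrow, hk]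
  rw [hm'] at h
  simp only [get2, PySem.List.pyGet?, Option.bind_eq_some_iff, List.length_set] at h ⊢
  obtain ⟨row₂, ⟨j', hj', hrow₂⟩, k', hk', hval₂⟩ := h
  by_cases hjj : j = j'
  · subst hjj
    have hjlt : j < m.length := (List.getElem?_eq_some_iff.1 hrow).1
    rw [List.getElem?_set] at hrow₂
    simp only [if_pos rfl, hjlt, if_true, Option.some_inj] at hrow₂
    subst hrow₂
    rw [List.length_set] at hk'
    refine ⟨row, ⟨j, hj', hrow⟩, k', hk', ?_⟩
    rw [List.getElem?_set] at hval₂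
    by_cases hkk : k = k'
    · subst hkk
      have hklt : k < row.length := pv_pyIdx?_lt hk
      simp only [if_pos rfl, hklt, if_true, Option.some_inj] at hval₂
      exact absurd hval₂.symm hw
    · simpa [hkk] using hval₂
  · refine ⟨row₂, ⟨j', hj', ?_⟩, k', hk', hval₂⟩
    rw [List.getElem?_set] at hrow₂
    simpa [hjj] using hrow₂

-- the A-side termination measure: unflashed world cells
def unflA (world : List (Int × Int)) (flashed : List (List Bool)) : Nat :=
  ((PySem.List.dedup world).filter (fun c => get2 flashed c.2 c.1 == some false)).length

theorem pv_unflA_lt (world : List (Int × Int)) (flashed : List (List Bool)) (x y : Int)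
    (hmem : (x, y) ∈ world) (hf : get2 flashed y x = some false) :
    unflA world (set2 flashed y x true) < unflA world flashed := by
  apply pv_filter_length_lt (a := (x, y))
  · intro a _ hq
    rw [beq_iff_eq] at hq ⊢
    exact pv_get2_set2_mono true hq (by simp)
  · exact (PySem.List.mem_dedup _ _).2 hmem
  · simpa using hf
  · simp [pv_get2_set2_self true hf]

-- transliteration of A: the Python stack is represented top-at-head (list.append/list.pop work at
-- the far end, so the seeded stack is world.reverse and pushes appear in reverse push order)
def loopA (world : List (Int × Int)) (data : List (List Int)) (flashed : List (List Bool))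
    (stack : List (Int × Int)) (flashes : Int) : Int :=
  match stack with
  | [] => flashes
  | (x, y) :: rest =>
    if (x, y) ∈ world then
      match hf : get2 flashed y x with
      | some false =>
        match get2 data y x with
        | some v =>
          let data1 := set2 data y x (v + 1)
          if v + 1 > 9 then
            loopA world (set2 data1 y x 0) (set2 flashed y x true)
              (nbrsPushA x y ++ rest) (flashes + 1)
          else loopA world data1 flashed rest flashes
        | none => flashes      -- IndexError on data[y][x] (outside Pre_)
      | some true => loopA world data flashed rest flashes
      | none => flashes        -- IndexError on flashed[y][x] (outside Pre_)
    else loopA world data flashed rest flashes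
termination_by 9 * unflA world flashed + stack.length
decreasing_by
  all_goals first
    | (have hlt := pv_unflA_lt world flashed x y (by assumption) hf
       simp only [nbrsPushA, List.length_append, List.length_cons, List.length_nil]
       omega)
    | (simp only [List.length_cons]; omega)

def flash_all (data : List (List Int)) (width : Int) (height : Int) (world : List (Int × Int)) : Int :=
  let flashed := (PySem.List.pyRange 0 height 1).map (fun _ => List.replicate width.toNat false)
  loopA world data flashed world.reverse 0

-- ===== PORT B =====
-- the (dx, dy) double loop of Source B, in iteration order, with (0, 0) skipped
def nbrOffsets : List (Int × Int) :=
  [(-1,-1),(-1,0),(-1,1),(0,-1),(0,1),(1,-1),(1,0),(1,1)]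

-- data[y][x] += 1  (no-op where Python raises IndexError, outside Pre_)
def bump (d : List (List Int)) (y x : Int) : List (List Int) :=
  match get2 d y x with
  | some v => set2 d y x (v + 1)
  | none => d

-- one world entry of a pass: state = (data, flashed, flashes, changed)
def bstep (wset : PySem.Set (Int × Int))
    (st : List (List Int) × PySem.Set (Int × Int) × Int × Bool) (p : Int × Int) :
    List (List Int) × PySem.Set (Int × Int) × Int × Bool :=
  let (data, flashed, flashes, _) := st
  if !(PySem.Set.contains flashed p) &&
      (match get2 data p.2 p.1 with | some v => decide (v > 9) | none => false) then
    let flashed' := PySem.Set.add flashed p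
    (nbrOffsets.foldl
      (fun d o =>
        let n := (p.1 + o.1, p.2 + o.2)
        if PySem.Set.contains wset n && !(PySem.Set.contains flashed' n) then
          bump d n.2 n.1
        else d) data,
     flashed', flashes + 1, true)
  else st

def onePass (wset : PySem.Set (Int × Int)) (world : List (Int × Int))
    (data : List (List Int)) (flashed : PySem.Set (Int × Int)) (flashes : Int) :
    List (List Int) × PySem.Set (Int × Int) × Int × Bool :=
  world.foldl (bstep wset) (data, flashed, flashes, false)

-- structural facts about a pass, used for passLoop's termination
theorem pv_bstep_struct (wset : PySem.Set (Int × Int)) (l : List (Int × Int))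
    (data : List (List Int)) (fl : PySem.Set (Int × Int)) (n : Int) (ch : Bool) :
    ∃ ext, (l.foldl (bstep wset) (data, fl, n, ch)).2.1 = fl ++ ext ∧
      (∀ c ∈ ext, c ∈ l ∧ c ∉ fl) ∧
      ((l.foldl (bstep wset) (data, fl, n, ch)).2.2.2 = true → ch = true ∨ ext ≠ []) := by
  induction l generalizing data fl n ch with
  | nil => exact ⟨[], by simp, by simp, fun h => Or.inl h⟩
  | cons p l ih =>
    simp only [List.foldl_cons]
    cases hg : (!(PySem.Set.contains fl p) &&
        (match get2 data p.2 p.1 with | some v => decide (v > 9) | none => false)) with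
    | false =>
      have hb : bstep wset (data, fl, n, ch) p = (data, fl, n, ch) := by
        simp only [bstep]
        rw [hg]
        simp
      rw [hb]
      obtain ⟨ext, h1, h2, h3⟩ := ih data fl n ch
      exact ⟨ext, h1, fun c hc => ⟨List.mem_cons_of_mem _ (h2 c hc).1, (h2 c hc).2⟩, h3⟩
    | true =>
      have hcp : PySem.Set.contains fl p = false := by
        cases hc : PySem.Set.contains fl p
        · rfl
        · rw [hc] at hg
          simp at hg
      have hpnot : p ∉ fl := by
        intro hm
        rw [(PySem.Set.contains_iff fl p).2 hm] at hcp
        simp at hcp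
      have hadd : PySem.Set.add fl p = fl ++ [p] := by
        unfold PySem.Set.add
        rw [hcp]
        simp
      have hb : bstep wset (data, fl, n, ch) p =
          ((nbrOffsets.foldl (fun d o =>
              let n' := (p.1 + o.1, p.2 + o.2)
              if PySem.Set.contains wset n' && !(PySem.Set.contains (PySem.Set.add fl p) n') then
                bump d n'.2 n'.1 else d) data), fl ++ [p], n + 1, true) := by
        simp only [bstep]
        rw [hg, hadd]
        simp
      rw [hb]
      obtain ⟨ext, h1, h2, h3⟩ := ih _ (fl ++ [p]) (n + 1) true
      refine ⟨p :: ext, by rw [h1]; simp, ?_, fun _ => Or.inr (by simp)⟩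
      intro c hc
      rcases List.mem_cons.1 hc with rfl | hc'
      · exact ⟨List.mem_cons_self, hpnot⟩
      · have := h2 c hc'
        exact ⟨List.mem_cons_of_mem _ this.1, fun hm => this.2 (by simp [hm])⟩

theorem pv_onePass_lt (wset : PySem.Set (Int × Int)) (world : List (Int × Int))
    (data : List (List Int)) (fl : PySem.Set (Int × Int)) (n : Int)
    (hch : (onePass wset world data fl n).2.2.2 = true) :
    ((PySem.List.dedup world).filter
        (fun c => !((onePass wset world data fl n).2.1.contains c))).length <
      ((PySem.List.dedup world).filter (fun c => !(fl.contains c))).length := by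
  obtain ⟨ext, h1, h2, h3⟩ := pv_bstep_struct wset world data fl n false
  unfold onePass at hch ⊢
  rcases h3 hch with hfalse | hne
  · cases hfalse
  obtain ⟨a, ha⟩ := List.exists_mem_of_ne_nil ext hne
  have haw : a ∈ world := (h2 a ha).1
  have hafl : a ∉ fl := (h2 a ha).2
  apply pv_filter_length_lt (a := a)
  · intro c _ hq
    rw [h1] at hq
    cases hc : fl.contains c
    · rfl
    · exfalso
      have hm : c ∈ fl := by simpa using hc
      have hm2 : (fl ++ ext).contains c = true := by simp [hm]
      rw [hm2] at hq; cases hq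
  · exact (PySem.List.mem_dedup world a).2 haw
  · cases hc : fl.contains a
    · rfl
    · exact absurd (by simpa using hc) hafl
  · rw [h1]
    simp [List.mem_append, ha]

def passLoop (wset : PySem.Set (Int × Int)) (world : List (Int × Int))
    (data : List (List Int)) (flashed : PySem.Set (Int × Int)) (flashes : Int) : Int :=
  let r := onePass wset world data flashed flashes
  if hch : r.2.2.2 = true then passLoop wset world r.1 r.2.1 r.2.2.1 else r.2.2.1
termination_by ((PySem.List.dedup world).filter (fun c => !(flashed.contains c))).length
decreasing_by
  exact pv_onePass_lt wset world data flashed flashes hch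

def flash_all_alt (data : List (List Int)) (width : Int) (height : Int) (world : List (Int × Int)) : Int :=
  let wset := PySem.Set.ofList world
  let data1 := world.foldl (fun d p => bump d p.2 p.1) data
  -- (Source B finally zeroes every flashed cell: that mutates `data` only, the returned count is unaffected)
  passLoop wset world data1 PySem.Set.empty 0

-- ===== PRECONDITION & SPEC =====
-- Pre_ excludes inputs with a world point outside the width×height rectangle or outside its data
-- row: there A raises IndexError or silently relies on Python's negative-index wraparound, under
-- which distinct world points alias one cell and A's count is accidental.
def Pre_flash_all (data : List (List Int)) (width : Int) (height : Int) (world : List (Int × Int)) : Prop :=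
  ∀ p ∈ world, 0 ≤ p.1 ∧ p.1 < width ∧ 0 ≤ p.2 ∧ p.2 < height ∧
    p.2 < (data.length : Int) ∧ p.1 < (((data.getD p.2.toNat []).length : Nat) : Int)
instance (data : List (List Int)) (width : Int) (height : Int) (world : List (Int × Int)) : Decidable (Pre_flash_all data width height world) := by unfold Pre_flash_all; infer_instance

def pvWitness_flash_all : List (List Int) × Int × Int × (List (Int × Int)) :=
  ([[9, 1], [2, 3]], 2, 2, [(0, 0), (1, 1)])

def Spec_flash_all (data : List (List Int)) (width : Int) (height : Int) (world : List (Int × Int)) (out : Int) : Prop := out = flash_all_alt data width height world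
instance (data : List (List Int)) (width : Int) (height : Int) (world : List (Int × Int)) (out : Int) : Decidable (Spec_flash_all data width height world out) := by unfold Spec_flash_all; infer_instance

-- ===== CLAIM (what is proved, stated in full; the proofs are below) =====
def Claim_equal_flash_all : Prop := ∀ (data : List (List Int)) (width : Int) (height : Int) (world : List (Int × Int)), Dom_flash_all data width height world → Pre_flash_all data width height world → Spec_flash_all data width height world (flash_all data width height world)

-- ===== LEMMAS AND PROOFS =====

-- 2-d cell abstraction (used on the nonnegative in-range coordinates Pre_ guarantees)
def cellD {α : Type} (m : List (List α)) (d : α) (p : Int × Int) : α :=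
  (m.getD p.2.toNat []).getD p.1.toNat d

def InGrid {α : Type} (m : List (List α)) (p : Int × Int) : Prop :=
  0 ≤ p.1 ∧ 0 ≤ p.2 ∧ p.2.toNat < m.length ∧ p.1.toNat < (m.getD p.2.toNat []).length

theorem pv_some_bind {α β : Type} (a : α) (f : α → Option β) : (some a).bind f = f a := rfl

theorem pv_cellD_row {α : Type} {M : List (List α)} (d : α) (q : Int × Int) {R : List α}
    (hR : M[q.2.toNat]? = some R) : cellD M d q = R.getD q.1.toNat d := by
  simp only [cellD, List.getD_eq_getElem?_getD, hR, Option.getD_some]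

theorem pv_get2_eq {α : Type} {m : List (List α)} {p : Int × Int} (d : α) (h : InGrid m p) :
    get2 m p.2 p.1 = some (cellD m d p) := by
  obtain ⟨h1, h2, h3, h4⟩ := h
  have hy : PySem.List.pyIdx? m.length p.2 = some p.2.toNat := by
    simp only [PySem.List.pyIdx?]
    rw [if_pos h2, if_pos (by omega)]
  have hrow : m[p.2.toNat]? = some (m.getD p.2.toNat []) := by
    simp [List.getD_eq_getElem?_getD, List.getElem?_eq_getElem h3]
  have hx : PySem.List.pyIdx? (m.getD p.2.toNat []).length p.1 = some p.1.toNat := by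
    simp only [PySem.List.pyIdx?]
    rw [if_pos h1, if_pos (by omega)]
  have hcell : cellD m d p = (m.getD p.2.toNat [])[p.1.toNat]'h4 := by
    rw [pv_cellD_row d p hrow]
    rw [List.getD_eq_getElem?_getD, List.getElem?_eq_getElem h4, Option.getD_some]
  have hv : (m.getD p.2.toNat [])[p.1.toNat]? = some (cellD m d p) := by
    rw [hcell]
    exact List.getElem?_eq_getElem h4
  unfold get2 PySem.List.pyGet?
  rw [hy, pv_some_bind, hrow, pv_some_bind, hx, pv_some_bind]
  exact hv

theorem pv_set2_eq {α : Type} {m : List (List α)} {p : Int × Int} (v : α) (h : InGrid m p) :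
    set2 m p.2 p.1 v = m.set p.2.toNat ((m.getD p.2.toNat []).set p.1.toNat v) := by
  obtain ⟨h1, h2, h3, h4⟩ := h
  have hy : PySem.List.pyIdx? m.length p.2 = some p.2.toNat := by
    simp only [PySem.List.pyIdx?]
    rw [if_pos h2, if_pos (by omega)]
  have hrow : m[p.2.toNat]? = some (m.getD p.2.toNat []) := by
    simp [List.getD_eq_getElem?_getD, List.getElem?_eq_getElem h3]
  have hx : PySem.List.pyIdx? (m.getD p.2.toNat []).length p.1 = some p.1.toNat := by
    simp only [PySem.List.pyIdx?]
    rw [if_pos h1, if_pos (by omega)]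
  simp only [set2, hy, hrow, hx]

theorem pv_shape_set2 {α : Type} (m : List (List α)) (y x : Int) (v : α) :
    (set2 m y x v).length = m.length ∧
      ∀ j : Nat, ((set2 m y x v).getD j []).length = (m.getD j []).length := by
  rcases hj : PySem.List.pyIdx? m.length y with _ | j0
  · simp [set2, hj]
  rcases hrow : m[j0]? with _ | row
  · simp [set2, hj, hrow]
  rcases hk : PySem.List.pyIdx? row.length x with _ | k0
  · simp [set2, hj, hrow, hk]
  obtain ⟨hjlt, hjv⟩ := List.getElem?_eq_some_iff.1 hrow
  constructor
  · simp [set2, hj, hrow, hk]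
  · intro j
    simp only [set2, hj, hrow, hk, List.getD_eq_getElem?_getD, List.getElem?_set]
    by_cases hjj : j0 = j
    · subst hjj
      simp [hjlt, hjv]
    · simp [hjj]

theorem pv_inGrid_set2 {α : Type} (m : List (List α)) (y x : Int) (v : α) (q : Int × Int) :
    InGrid (set2 m y x v) q ↔ InGrid m q := by
  unfold InGrid
  rw [(pv_shape_set2 m y x v).1, (pv_shape_set2 m y x v).2 q.2.toNat]

theorem pv_cellD_set2 {α : Type} {m : List (List α)} {p : Int × Int} (q : Int × Int) (d v : α)
    (hp : InGrid m p) (hq1 : 0 ≤ q.1) (hq2 : 0 ≤ q.2) :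
    cellD (set2 m p.2 p.1 v) d q = if q = p then v else cellD m d q := by
  obtain ⟨hp1, hp2, hp3, hp4⟩ := hp
  rw [pv_set2_eq v ⟨hp1, hp2, hp3, hp4⟩]
  by_cases hy : p.2.toNat = q.2.toNat
  · have houter : (m.set p.2.toNat ((m.getD p.2.toNat []).set p.1.toNat v))[q.2.toNat]? =
        some ((m.getD p.2.toNat []).set p.1.toNat v) := by
      rw [List.getElem?_set, if_pos hy, if_pos hp3]
    have hrow' : m[q.2.toNat]? = some (m.getD p.2.toNat []) := by
      rw [← hy]
      simp [List.getD_eq_getElem?_getD, List.getElem?_eq_getElem hp3]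
    rw [pv_cellD_row d q houter]
    by_cases hqp : q = p
    · subst hqp
      rw [if_pos rfl]
      rw [List.getD_eq_getElem?_getD, List.getElem?_set, if_pos rfl, if_pos hp4,
        Option.getD_some]
    · have hx : p.1.toNat ≠ q.1.toNat := by
        intro hEq
        apply hqp
        have ha : q.1 = p.1 := by omega
        have hb : q.2 = p.2 := by omega
        exact Prod.ext ha hb
      rw [if_neg hqp, pv_cellD_row d q hrow']
      rw [List.getD_eq_getElem?_getD, List.getD_eq_getElem?_getD, List.getElem?_set, if_neg hx]
      simp [List.getD_eq_getElem?_getD]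
  · have hqp : q ≠ p := by
      intro hEq
      exact hy (by rw [hEq])
    rw [if_neg hqp]
    have houter : (m.set p.2.toNat ((m.getD p.2.toNat []).set p.1.toNat v))[q.2.toNat]? =
        m[q.2.toNat]? := by
      rw [List.getElem?_set, if_neg hy]
    rcases hm : m[q.2.toNat]? with _ | R
    · simp only [List.getD_eq_getElem?_getD] at houter
      simp only [cellD, List.getD_eq_getElem?_getD, houter, hm]
    · rw [pv_cellD_row d q (houter.trans hm), pv_cellD_row d q hm]

-- neighbourhood lemmas
def nbrs (p : Int × Int) : List (Int × Int) :=
  nbrOffsets.map (fun o => (p.1 + o.1, p.2 + o.2))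

theorem pv_mem_nbrs {p q : Int × Int} :
    q ∈ nbrs p ↔ (q.1 = p.1 - 1 ∨ q.1 = p.1 ∨ q.1 = p.1 + 1) ∧
      (q.2 = p.2 - 1 ∨ q.2 = p.2 ∨ q.2 = p.2 + 1) ∧ q ≠ p := by
  have hne : (q ≠ p) ↔ ¬(q.1 = p.1 ∧ q.2 = p.2) := by
    constructor
    · intro h hc; exact h (Prod.ext hc.1 hc.2)
    · intro h hc; exact h ⟨by rw [hc], by rw [hc]⟩
  rw [hne]
  simp only [nbrs, nbrOffsets, List.map_cons, List.map_nil, List.mem_cons,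
    List.not_mem_nil, or_false, Prod.ext_iff]
  omega

theorem pv_nbrs_symm (p q : Int × Int) : q ∈ nbrs p ↔ p ∈ nbrs q := by
  rw [pv_mem_nbrs, pv_mem_nbrs]
  have h1 : (q ≠ p) ↔ ¬(q.1 = p.1 ∧ q.2 = p.2) := by
    constructor
    · intro h hc; exact h (Prod.ext hc.1 hc.2)
    · intro h hc; exact h ⟨by rw [hc], by rw [hc]⟩
  have h2 : (p ≠ q) ↔ ¬(p.1 = q.1 ∧ p.2 = q.2) := by
    constructor
    · intro h hc; exact h (Prod.ext hc.1 hc.2)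
    · intro h hc; exact h ⟨by rw [hc], by rw [hc]⟩
  rw [h1, h2]
  omega

theorem pv_nodup_nbrs (p : Int × Int) : (nbrs p).Nodup := by
  simp [nbrs, nbrOffsets, Prod.ext_iff] <;> omega

theorem pv_mem_nbrsPushA {x y : Int} {q : Int × Int} :
    q ∈ nbrsPushA x y ↔ q ∈ nbrs (x, y) := by
  rw [pv_mem_nbrs]
  have hne : (q ≠ (x, y)) ↔ ¬(q.1 = x ∧ q.2 = y) := by
    constructor
    · intro h hc; exact h (Prod.ext hc.1 hc.2)
    · intro h hc; exact h ⟨by rw [hc], by rw [hc]⟩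
  rw [hne]
  simp only [nbrsPushA, List.mem_cons, List.not_mem_nil, or_false, Prod.ext_iff]
  omega

theorem pv_nodup_nbrsPushA (x y : Int) : (nbrsPushA x y).Nodup := by
  simp [nbrsPushA, Prod.ext_iff] <;> omega

theorem pv_count_nbrsPushA (x y : Int) (c : Int × Int) :
    (nbrsPushA x y).count c = if c ∈ nbrs (x, y) then 1 else 0 := by
  by_cases hm : c ∈ nbrs (x, y)
  · rw [if_pos hm]
    exact List.count_eq_one_of_mem (pv_nodup_nbrsPushA x y) (pv_mem_nbrsPushA.2 hm)
  · rw [if_neg hm]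
    exact List.count_eq_zero_of_not_mem (fun h => hm (pv_mem_nbrsPushA.1 h))

-- counting helpers
theorem pv_filter_or {α : Type} [BEq α] [LawfulBEq α] (l : List α) (P P' : α → Bool) (c : α)
    (hl : l.Nodup) (hc : P c = false) (h : ∀ q ∈ l, P' q = (P q || q == c)) :
    (l.filter P').length = (l.filter P).length + (if c ∈ l then 1 else 0) := by
  simp only [← List.countP_eq_length_filter]
  induction l with
  | nil => simp
  | cons b l ih =>
    have hb := h b (by simp)
    have ihl := ih (List.nodup_cons.1 hl).2 (fun q hq => h q (by simp [hq]))
    by_cases hbc : b = c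
    · subst hbc
      have hcl : b ∉ l := (List.nodup_cons.1 hl).1
      simp only [List.countP_cons, hb, hc, if_pos (List.mem_cons_self), if_neg hcl] at ihl ⊢
      simp [ihl]
    · have hbP' : P' b = P b := by rw [hb]; simp [hbc]
      have hcm : (c ∈ b :: l) ↔ (c ∈ l) := by
        constructor
        · intro h'
          rcases List.mem_cons.1 h' with h'' | h''
          · exact absurd h''.symm hbc
          · exact h''
        · exact List.mem_cons_of_mem b
      simp only [List.countP_cons, hbP', hcm]
      omega

theorem pv_count_filter_map {α β : Type} [BEq β] [LawfulBEq β] (f : α → β) (l : List α) (c : β) :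
    (l.filter (fun o => f o == c)).length = (l.map f).count c := by
  induction l with
  | nil => simp
  | cons a l ih =>
    simp only [List.filter_cons, List.map_cons, List.count_cons]
    cases hfa : (f a == c) <;> simp only [hfa, if_true, if_false, Bool.false_eq_true,
      List.length_cons, ih] <;> omega

-- the flash sets and the fixed-point condition
def trueW (world : List (Int × Int)) (flashed : List (List Bool)) : List (Int × Int) :=
  (PySem.List.dedup world).filter (fun c => get2 flashed c.2 c.1 == some true)

def nbT (T : List (Int × Int)) (c : Int × Int) : Nat :=
  ((nbrs c).filter (fun q => decide (q ∈ T))).length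

def baseV (data0 : List (List Int)) (world : List (Int × Int)) (c : Int × Int) : Int :=
  cellD data0 0 c + (world.count c : Int)

def ClosedW (data0 : List (List Int)) (world : List (Int × Int)) (T : List (Int × Int)) : Prop :=
  ∀ c ∈ world, 9 < baseV data0 world c + (nbT T c : Int) → c ∈ T

theorem pv_nbT_mono {T₁ T₂ : List (Int × Int)} (h : ∀ q ∈ T₁, q ∈ T₂) (c : Int × Int) :
    nbT T₁ c ≤ nbT T₂ c := by
  simp only [nbT, ← List.countP_eq_length_filter]
  apply List.countP_mono_left
  intro x _ hx
  simp only [decide_eq_true_eq] at hx ⊢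
  exact h x hx

theorem pv_nbT_append {F : List (Int × Int)} {p : Int × Int} (c : Int × Int) (hp : p ∉ F) :
    nbT (F ++ [p]) c = nbT F c + (if p ∈ nbrs c then 1 else 0) := by
  unfold nbT
  exact pv_filter_or (nbrs c) _ _ p (pv_nodup_nbrs c) (by simp [hp])
    (fun q _ => by by_cases h : q = p <;> simp [List.mem_append, h])

theorem pv_mem_trueW {world : List (Int × Int)} {flashed : List (List Bool)} {c : Int × Int} :
    c ∈ trueW world flashed ↔ c ∈ world ∧ get2 flashed c.2 c.1 = some true := by
  simp [trueW, PySem.List.mem_dedup]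

theorem pv_nodup_trueW (world : List (Int × Int)) (flashed : List (List Bool)) :
    (trueW world flashed).Nodup :=
  List.Nodup.filter _ (PySem.List.nodup_dedup world)

-- A-side invariant
def InvA (data0 : List (List Int)) (world : List (Int × Int)) (data : List (List Int))
    (flashed : List (List Bool)) (stack : List (Int × Int)) (cnt : Int) : Prop :=
  (∀ p ∈ world, InGrid data p) ∧ (∀ p ∈ world, InGrid flashed p) ∧
  cnt = ((trueW world flashed).length : Int) ∧
  (∀ c ∈ world, get2 flashed c.2 c.1 = some false →
    (cellD data 0 c + (stack.count c : Int) =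
        baseV data0 world c + (nbT (trueW world flashed) c : Int) ∧
      (cellD data 0 c ≤ 9 ∨ 1 ≤ stack.count c)))

theorem pv_loopA_char (data0 : List (List Int)) (world : List (Int × Int))
    (data : List (List Int)) (flashed : List (List Bool)) (stack : List (Int × Int)) (cnt : Int) :
    InvA data0 world data flashed stack cnt →
    ∃ F : List (Int × Int), F.Nodup ∧ (∀ c ∈ F, c ∈ world) ∧ ClosedW data0 world F ∧
      loopA world data flashed stack cnt = (F.length : Int) ∧
      (∀ T, ClosedW data0 world T → (∀ c ∈ trueW world flashed, c ∈ T) → ∀ c ∈ F, c ∈ T) := by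
  fun_induction loopA world data flashed stack cnt with
  | case1 data flashed cnt =>
    intro ⟨hGd, hGf, hcnt, hEq⟩
    refine ⟨trueW world flashed, pv_nodup_trueW world flashed,
      fun c hc => (pv_mem_trueW.1 hc).1, ?_, by simpa using hcnt, fun T _ hsub => hsub⟩
    intro c hc hgt
    have hflag := pv_get2_eq false (hGf c hc)
    cases hcb : cellD flashed false c with
    | true => exact pv_mem_trueW.2 ⟨hc, by rw [hflag, hcb]⟩
    | false =>
      exfalso
      obtain ⟨hE1, hE2⟩ := hEq c hc (by rw [hflag, hcb])
      simp only [List.count_nil] at hE1 hE2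
      omega
  | case2 data flashed cnt x y rest hmem hf v hv data1 hgt ih =>
    intro ⟨hGd, hGf, hcnt, hEq⟩
    have hGdp : InGrid data (x, y) := hGd (x, y) hmem
    have hGfp : InGrid flashed (x, y) := hGf (x, y) hmem
    have hvc : cellD data 0 (x, y) = v := by
      have h := pv_get2_eq 0 hGdp
      rw [hv] at h
      exact (Option.some.inj h).symm
    have hp0nF : (x, y) ∉ trueW world flashed := by
      intro hm
      have h := (pv_mem_trueW.1 hm).2
      rw [hf] at h
      simp at h
    have hflag' : ∀ q ∈ world, get2 (set2 flashed y x true) q.2 q.1 =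
        some (if q = (x, y) then true else cellD flashed false q) := by
      intro q hq
      have hGq' : InGrid (set2 flashed y x true) q :=
        (pv_inGrid_set2 flashed y x true q).2 (hGf q hq)
      rw [pv_get2_eq false hGq']
      exact congrArg some (pv_cellD_set2 q false true hGfp (hGf q hq).1 (hGf q hq).2.1)
    have hmemW' : ∀ q, q ∈ trueW world (set2 flashed y x true) ↔
        q ∈ trueW world flashed ∨ q = (x, y) := by
      intro q
      constructor
      · intro hm
        obtain ⟨hqw, hqf⟩ := pv_mem_trueW.1 hm
        by_cases hqp : q = (x, y)
        · exact Or.inr hqp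
        · left
          refine pv_mem_trueW.2 ⟨hqw, ?_⟩
          rw [hflag' q hqw, if_neg hqp] at hqf
          rw [pv_get2_eq false (hGf q hqw)]
          exact hqf
      · rintro (hm | rfl)
        · obtain ⟨hqw, hqf⟩ := pv_mem_trueW.1 hm
          refine pv_mem_trueW.2 ⟨hqw, ?_⟩
          rw [hflag' q hqw]
          by_cases hqp : q = (x, y)
          · rw [if_pos hqp]
          · rw [if_neg hqp]
            rw [pv_get2_eq false (hGf q hqw)] at hqf
            exact hqf
        · exact pv_mem_trueW.2 ⟨hmem, by rw [hflag' (x, y) hmem, if_pos rfl]⟩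
    have hfc : cellD flashed false (x, y) = false := by
      have h := pv_get2_eq false hGfp
      rw [hf] at h
      exact (Option.some.inj h).symm
    have hlen' : (trueW world (set2 flashed y x true)).length =
        (trueW world flashed).length + 1 := by
      unfold trueW
      have h := pv_filter_or (PySem.List.dedup world)
          (fun c => get2 flashed c.2 c.1 == some true)
          (fun c => get2 (set2 flashed y x true) c.2 c.1 == some true) (x, y)
          (PySem.List.nodup_dedup world) (by simp [hf]) ?_
      · rw [h, if_pos ((PySem.List.mem_dedup world (x, y)).2 hmem)]
      · intro q hqd
        have hqw := (PySem.List.mem_dedup world q).1 hqd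
        show (get2 (set2 flashed y x true) q.2 q.1 == some true) =
          ((get2 flashed q.2 q.1 == some true) || q == (x, y))
        rw [hflag' q hqw, pv_get2_eq false (hGf q hqw)]
        by_cases hqp : q = (x, y)
        · subst hqp
          simp [hfc]
        · simp [hqp]
    have hnbT' : ∀ q, nbT (trueW world (set2 flashed y x true)) q =
        nbT (trueW world flashed) q + (if (x, y) ∈ nbrs q then 1 else 0) := by
      intro q
      unfold nbT
      refine pv_filter_or (nbrs q) _ _ (x, y) (pv_nodup_nbrs q) (by simp [hp0nF]) ?_
      intro r _
      show (decide (r ∈ trueW world (set2 flashed y x true))) =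
        ((decide (r ∈ trueW world flashed)) || r == (x, y))
      by_cases hrp : r = (x, y)
      · subst hrp
        have h1 := (hmemW' (x, y)).2 (Or.inr rfl)
        simp [h1, hp0nF]
      · by_cases hm : r ∈ trueW world flashed <;> simp [hmemW' r, hrp, hm]
    have hInv' : InvA data0 world (set2 (set2 data y x (v + 1)) y x 0) (set2 flashed y x true)
        (nbrsPushA x y ++ rest) (cnt + 1) := by
      have hGd1 : ∀ q ∈ world, InGrid (set2 data y x (v + 1)) q :=
        fun q hq => (pv_inGrid_set2 data y x (v + 1) q).2 (hGd q hq)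
      refine ⟨fun q hq => (pv_inGrid_set2 (set2 data y x (v + 1)) y x 0 q).2 (hGd1 q hq),
        fun q hq => (pv_inGrid_set2 flashed y x true q).2 (hGf q hq), ?_, ?_⟩
      · rw [hlen']
        push_cast
        omega
      · intro q hq hqflag
        have hqp : q ≠ (x, y) := by
          intro h
          rw [hflag' q hq, if_pos h] at hqflag
          simp at hqflag
        have hqold : get2 flashed q.2 q.1 = some false := by
          rw [hflag' q hq, if_neg hqp] at hqflag
          rw [pv_get2_eq false (hGf q hq)]
          exact hqflag
        obtain ⟨hE1, hE2⟩ := hEq q hq hqold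
        have hc1 : cellD (set2 data y x (v + 1)) 0 q = cellD data 0 q :=
          (pv_cellD_set2 q 0 (v + 1) hGdp (hGf q hq).1 (hGf q hq).2.1).trans (if_neg hqp)
        have hGdp1 : InGrid (set2 data y x (v + 1)) (x, y) :=
          (pv_inGrid_set2 data y x (v + 1) (x, y)).2 hGdp
        have hc2 : cellD (set2 (set2 data y x (v + 1)) y x 0) 0 q = cellD data 0 q := by
          rw [(pv_cellD_set2 q 0 0 hGdp1 (hGf q hq).1 (hGf q hq).2.1).trans (if_neg hqp), hc1]
        have hrest : (((x, y) :: rest).count q) = rest.count q :=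
          List.count_cons_of_ne (fun h => hqp h.symm)
        have hcount : (nbrsPushA x y ++ rest).count q =
            rest.count q + (if q ∈ nbrs (x, y) then 1 else 0) := by
          rw [List.count_append, pv_count_nbrsPushA x y q]
          omega
        rw [hrest] at hE1 hE2
        constructor
        · rw [hc2, hnbT' q, hcount]
          have hsymm := pv_nbrs_symm (x, y) q
          by_cases hqm : q ∈ nbrs (x, y)
          · rw [if_pos hqm, if_pos (hsymm.1 hqm)]
            push_cast at hE1 ⊢
            omega
          · rw [if_neg hqm, if_neg (fun h => hqm (hsymm.2 h))]
            push_cast at hE1 ⊢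
            omega
        · rcases hE2 with h | h
          · left
            rw [hc2]
            exact h
          · right
            rw [hcount]
            omega
    obtain ⟨F, hFn, hFw, hFcl, hres, hforce⟩ := ih hInv'
    refine ⟨F, hFn, hFw, hFcl, hres, ?_⟩
    intro T hT hsub c hc
    refine hforce T hT ?_ c hc
    intro q hqm
    rcases (hmemW' q).1 hqm with hq | rfl
    · exact hsub q hq
    · refine hT (x, y) hmem ?_
      obtain ⟨hE1, _⟩ := hEq (x, y) hmem hf
      have hcc : (((x, y) :: rest).count (x, y)) = rest.count (x, y) + 1 :=
        List.count_cons_self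
      have hmono := pv_nbT_mono hsub (x, y)
      rw [hvc, hcc] at hE1
      push_cast at hE1 ⊢
      omega
  | case3 data flashed cnt x y rest hmem hf v hv data1 hgt ih =>
    intro ⟨hGd, hGf, hcnt, hEq⟩
    apply ih
    have hGdp : InGrid data (x, y) := hGd (x, y) hmem
    have hvc : cellD data 0 (x, y) = v := by
      have h := pv_get2_eq 0 hGdp
      rw [hv] at h
      exact (Option.some.inj h).symm
    refine ⟨fun q hq => (pv_inGrid_set2 data y x (v + 1) q).2 (hGd q hq), hGf, hcnt, ?_⟩
    intro q hq hqf
    by_cases hqp : q = (x, y)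
    · obtain ⟨hE1, hE2⟩ := hEq q hq hqf
      have hc : cellD (set2 data y x (v + 1)) 0 q = v + 1 :=
        (pv_cellD_set2 q 0 (v + 1) hGdp (hGf q hq).1 (hGf q hq).2.1).trans (if_pos hqp)
      have hcc : (((x, y) :: rest).count q) = rest.count q + 1 := by
        rw [hqp]
        exact List.count_cons_self
      have hvq : cellD data 0 q = v := by
        rw [hqp]
        exact hvc
      rw [hcc, hvq] at hE1
      constructor
      · rw [hc]
        push_cast at hE1 ⊢
        omega
      · left
        rw [hc]
        omega
    · obtain ⟨hE1, hE2⟩ := hEq q hq hqf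
      have hc : cellD (set2 data y x (v + 1)) 0 q = cellD data 0 q :=
        (pv_cellD_set2 q 0 (v + 1) hGdp (hGf q hq).1 (hGf q hq).2.1).trans (if_neg hqp)
      have hrest : (((x, y) :: rest).count q) = rest.count q :=
        List.count_cons_of_ne (fun h => hqp h.symm)
      rw [hrest] at hE1 hE2
      exact ⟨by rw [hc]; exact hE1, by rw [hc]; exact hE2⟩
  | case4 data flashed cnt x y rest hmem hf hv =>
    intro ⟨hGd, hGf, hcnt, hEq⟩
    exact absurd hv (by rw [pv_get2_eq 0 (hGd (x, y) hmem)]; simp)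
  | case5 data flashed cnt x y rest hmem hf ih =>
    intro ⟨hGd, hGf, hcnt, hEq⟩
    apply ih
    refine ⟨hGd, hGf, hcnt, ?_⟩
    intro q hq hqf
    obtain ⟨hE1, hE2⟩ := hEq q hq hqf
    have hqp : q ≠ (x, y) := by
      intro h
      rw [h] at hqf
      simp [hf] at hqf
    have hrest : (((x, y) :: rest).count q) = rest.count q :=
      List.count_cons_of_ne (fun h => hqp h.symm)
    rw [hrest] at hE1 hE2
    exact ⟨hE1, hE2⟩
  | case6 data flashed cnt x y rest hmem hf =>
    intro ⟨hGd, hGf, hcnt, hEq⟩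
    exact absurd hf (by rw [pv_get2_eq false (hGf (x, y) hmem)]; simp)
  | case7 data flashed cnt x y rest hmem ih =>
    intro ⟨hGd, hGf, hcnt, hEq⟩
    apply ih
    refine ⟨hGd, hGf, hcnt, ?_⟩
    intro q hq hqf
    obtain ⟨hE1, hE2⟩ := hEq q hq hqf
    have hqp : q ≠ (x, y) := by
      intro h
      rw [h] at hq
      exact hmem hq
    have hrest : (((x, y) :: rest).count q) = rest.count q :=
      List.count_cons_of_ne (fun h => hqp h.symm)
    rw [hrest] at hE1 hE2
    exact ⟨hE1, hE2⟩

-- B-side semantics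
theorem pv_contains_ofList (world : List (Int × Int)) (q : Int × Int) :
    PySem.Set.contains (PySem.Set.ofList world) q = decide (q ∈ world) := by
  cases hc : PySem.Set.contains (PySem.Set.ofList world) q
  · have hn : q ∉ world := by
      intro hm
      rw [(PySem.Set.contains_iff _ q).2 ((PySem.Set.mem_ofList world q).2 hm)] at hc
      simp at hc
    simp [hn]
  · have hm : q ∈ world := (PySem.Set.mem_ofList world q).1 ((PySem.Set.contains_iff _ q).1 hc)
    simp [hm]

theorem pv_contains_list (fl : List (Int × Int)) (q : Int × Int) :
    PySem.Set.contains fl q = decide (q ∈ fl) := by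
  cases hc : PySem.Set.contains fl q
  · have hn : q ∉ fl := by
      intro hm
      rw [(PySem.Set.contains_iff fl q).2 hm] at hc
      simp at hc
    simp [hn]
  · have hm : q ∈ fl := (PySem.Set.contains_iff fl q).1 hc
    simp [hm]

theorem pv_bump_eq {data : List (List Int)} {n : Int × Int} (hG : InGrid data n) :
    bump data n.2 n.1 = set2 data n.2 n.1 (cellD data 0 n + 1) := by
  unfold bump
  rw [pv_get2_eq 0 hG]

theorem pv_flashOne (world : List (Int × Int)) (fl₁ : List (Int × Int)) (p : Int × Int)
    (offs : List (Int × Int)) :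
    ∀ data : List (List Int), (∀ q ∈ world, InGrid data q) →
      (∀ q ∈ world, InGrid (offs.foldl (fun d o =>
          if PySem.Set.contains (PySem.Set.ofList world) (p.1 + o.1, p.2 + o.2) &&
              !(PySem.Set.contains fl₁ (p.1 + o.1, p.2 + o.2)) then
            bump d (p.2 + o.2) (p.1 + o.1) else d) data) q) ∧
      (∀ c ∈ world, c ∉ fl₁ →
        cellD (offs.foldl (fun d o =>
            if PySem.Set.contains (PySem.Set.ofList world) (p.1 + o.1, p.2 + o.2) &&
                !(PySem.Set.contains fl₁ (p.1 + o.1, p.2 + o.2)) then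
              bump d (p.2 + o.2) (p.1 + o.1) else d) data) 0 c =
          cellD data 0 c +
            ((offs.filter (fun o => ((p.1 + o.1, p.2 + o.2) : Int × Int) == c)).length : Int)) := by
  induction offs with
  | nil => exact fun data hGd => ⟨hGd, by simp⟩
  | cons o offs ih =>
    intro data hGd
    simp only [List.foldl_cons, List.filter_cons]
    cases hg : (PySem.Set.contains (PySem.Set.ofList world) (p.1 + o.1, p.2 + o.2) &&
        !(PySem.Set.contains fl₁ (p.1 + o.1, p.2 + o.2))) with
    | false =>
      simp only [Bool.false_eq_true, if_false]
      obtain ⟨hg', hc'⟩ := ih data hGd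
      refine ⟨hg', ?_⟩
      intro c hcw hcf
      have hhead : ((((p.1 + o.1, p.2 + o.2) : Int × Int) == c) : Bool) = false := by
        by_cases he : ((p.1 + o.1, p.2 + o.2) : Int × Int) = c
        · exfalso
          rw [pv_contains_ofList, pv_contains_list, he] at hg
          simp [hcw, hcf] at hg
        · simp [he]
      rw [hhead]
      simp only [Bool.false_eq_true, if_false]
      exact hc' c hcw hcf
    | true =>
      simp only [if_true]
      rw [Bool.and_eq_true] at hg
      have hn0w : ((p.1 + o.1, p.2 + o.2) : Int × Int) ∈ world := by
        have h := hg.1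
        rw [pv_contains_ofList] at h
        simpa using h
      have hn0f : ((p.1 + o.1, p.2 + o.2) : Int × Int) ∉ fl₁ := by
        have h := hg.2
        rw [pv_contains_list] at h
        simpa using h
      have hGn : InGrid data (p.1 + o.1, p.2 + o.2) := hGd _ hn0w
      rw [show bump data (p.2 + o.2) (p.1 + o.1) =
          set2 data (p.2 + o.2) (p.1 + o.1) (cellD data 0 (p.1 + o.1, p.2 + o.2) + 1)
        from pv_bump_eq hGn]
      have hGd1 : ∀ q ∈ world, InGrid
          (set2 data (p.2 + o.2) (p.1 + o.1) (cellD data 0 (p.1 + o.1, p.2 + o.2) + 1)) q :=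
        fun q hq => (pv_inGrid_set2 data (p.2 + o.2) (p.1 + o.1) _ q).2 (hGd q hq)
      obtain ⟨hg', hc'⟩ := ih _ hGd1
      refine ⟨hg', ?_⟩
      intro c hcw hcf
      rw [hc' c hcw hcf]
      have hcell : cellD (set2 data (p.2 + o.2) (p.1 + o.1)
          (cellD data 0 (p.1 + o.1, p.2 + o.2) + 1)) 0 c =
          cellD data 0 c + (if c = (p.1 + o.1, p.2 + o.2) then 1 else 0) := by
        have h := pv_cellD_set2 (m := data) (p := (p.1 + o.1, p.2 + o.2)) c 0
          (cellD data 0 (p.1 + o.1, p.2 + o.2) + 1) hGn (hGd c hcw).1 (hGd c hcw).2.1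
        rw [h]
        by_cases he : c = (p.1 + o.1, p.2 + o.2)
        · rw [if_pos he, if_pos he, he]
        · rw [if_neg he, if_neg he]
          omega
      rw [hcell]
      by_cases he : c = (p.1 + o.1, p.2 + o.2)
      · have hbeq : ((((p.1 + o.1, p.2 + o.2) : Int × Int) == c) : Bool) = true := by
          simp [he]
        rw [if_pos he, hbeq]
        simp only [if_true, List.length_cons]
        push_cast
        omega
      · have hbeq : ((((p.1 + o.1, p.2 + o.2) : Int × Int) == c) : Bool) = false := by
          simp only [beq_eq_false_iff_ne, ne_eq]
          exact fun h => he h.symm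
        rw [if_neg he, hbeq]
        simp only [Bool.false_eq_true, if_false]
        omega

-- B-side invariant
def InvB (data0 : List (List Int)) (world : List (Int × Int)) (data : List (List Int))
    (fl : List (Int × Int)) (cnt : Int) : Prop :=
  (∀ p ∈ world, InGrid data p) ∧ fl.Nodup ∧ (∀ c ∈ fl, c ∈ world) ∧ cnt = (fl.length : Int) ∧
  (∀ c ∈ world, c ∉ fl → cellD data 0 c = baseV data0 world c + (nbT fl c : Int))

theorem pv_pass_sem (data0 : List (List Int)) (world : List (Int × Int)) (T : List (Int × Int))
    (hT : ClosedW data0 world T) (l : List (Int × Int)) (hl : ∀ p ∈ l, p ∈ world)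
    (data : List (List Int)) (fl : List (Int × Int)) (cnt : Int) (ch : Bool)
    (hInv : InvB data0 world data fl cnt) (hflT : ∀ c ∈ fl, c ∈ T) :
    InvB data0 world (l.foldl (bstep (PySem.Set.ofList world)) (data, fl, cnt, ch)).1
        (l.foldl (bstep (PySem.Set.ofList world)) (data, fl, cnt, ch)).2.1
        (l.foldl (bstep (PySem.Set.ofList world)) (data, fl, cnt, ch)).2.2.1 ∧
    (∀ c ∈ (l.foldl (bstep (PySem.Set.ofList world)) (data, fl, cnt, ch)).2.1, c ∈ T) ∧
    ((l.foldl (bstep (PySem.Set.ofList world)) (data, fl, cnt, ch)).2.2.2 = false →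
      (l.foldl (bstep (PySem.Set.ofList world)) (data, fl, cnt, ch)) = (data, fl, cnt, ch) ∧
        ∀ p ∈ l, p ∈ fl ∨ ¬(9 < cellD data 0 p)) := by
  induction l generalizing data fl cnt ch with
  | nil => exact ⟨hInv, hflT, fun _ => ⟨rfl, by simp⟩⟩
  | cons p l ih =>
    have hpw : p ∈ world := hl p (by simp)
    obtain ⟨hGd, hfn, hfw, hcnt, hEqB⟩ := hInv
    have hmatch : (match get2 data p.2 p.1 with
        | some v => decide (v > 9) | none => false) = decide (9 < cellD data 0 p) := by
      rw [pv_get2_eq 0 (hGd p hpw)]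
    simp only [List.foldl_cons]
    by_cases hflp : p ∈ fl
    · have hg : (!(PySem.Set.contains fl p) &&
          (match get2 data p.2 p.1 with | some v => decide (v > 9) | none => false)) = false := by
        rw [pv_contains_list]
        simp [hflp]
      have hb : bstep (PySem.Set.ofList world) (data, fl, cnt, ch) p = (data, fl, cnt, ch) := by
        simp only [bstep]
        rw [hg]
        simp
      rw [hb]
      obtain ⟨ha, hb2, hc2⟩ := ih (fun q hq => hl q (by simp [hq])) data fl cnt ch
        ⟨hGd, hfn, hfw, hcnt, hEqB⟩ hflT
      refine ⟨ha, hb2, ?_⟩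
      intro hc0
      obtain ⟨hr, hquiet⟩ := hc2 hc0
      refine ⟨hr, ?_⟩
      intro q hq
      rcases List.mem_cons.1 hq with rfl | hq'
      · exact Or.inl hflp
      · exact hquiet q hq'
    · by_cases hcell : 9 < cellD data 0 p
      · have hcpf : PySem.Set.contains fl p = false := by
          rw [pv_contains_list]
          simp [hflp]
        have hg : (!(PySem.Set.contains fl p) &&
            (match get2 data p.2 p.1 with | some v => decide (v > 9) | none => false)) = true := by
          rw [hmatch, hcpf]
          simp [hcell]
        have hadd : PySem.Set.add fl p = fl ++ [p] := by
          unfold PySem.Set.add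
          rw [hcpf]
          simp
        have hb : bstep (PySem.Set.ofList world) (data, fl, cnt, ch) p =
            ((nbrOffsets.foldl (fun d o =>
                if PySem.Set.contains (PySem.Set.ofList world) (p.1 + o.1, p.2 + o.2) &&
                    !(PySem.Set.contains (fl ++ [p]) (p.1 + o.1, p.2 + o.2)) then
                  bump d (p.2 + o.2) (p.1 + o.1) else d) data), fl ++ [p], cnt + 1, true) := by
          simp only [bstep]
          rw [hg, hadd]
          simp
        rw [hb]
        have hpT : p ∈ T := by
          refine hT p hpw ?_
          have hE := hEqB p hpw hflp
          have hmono := pv_nbT_mono hflT p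
          rw [hE] at hcell
          push_cast at hcell ⊢
          omega
        obtain ⟨hg1, hc1⟩ := pv_flashOne world (fl ++ [p]) p nbrOffsets data hGd
        have hInv1 : InvB data0 world
            (nbrOffsets.foldl (fun d o =>
                if PySem.Set.contains (PySem.Set.ofList world) (p.1 + o.1, p.2 + o.2) &&
                    !(PySem.Set.contains (fl ++ [p]) (p.1 + o.1, p.2 + o.2)) then
                  bump d (p.2 + o.2) (p.1 + o.1) else d) data)
            (fl ++ [p]) (cnt + 1) := by
          refine ⟨hg1, ?_, ?_, ?_, ?_⟩
          · simp [List.nodup_append, hfn]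
            exact fun a b hab heq => hflp (heq ▸ hab)
          · intro c hc
            rcases List.mem_append.1 hc with hc | hc
            · exact hfw c hc
            · rw [List.mem_singleton.1 hc]
              exact hpw
          · simp only [List.length_append, List.length_cons, List.length_nil]
            push_cast
            omega
          · intro c hcw hcf
            have hcfl : c ∉ fl := fun hm => hcf (by simp [hm])
            rw [hc1 c hcw hcf]
            have hoc : ((nbrOffsets.filter
                (fun o => ((p.1 + o.1, p.2 + o.2) : Int × Int) == c)).length) =
                (if c ∈ nbrs p then 1 else 0) := by
              rw [pv_count_filter_map (fun o => ((p.1 + o.1, p.2 + o.2) : Int × Int))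
                nbrOffsets c]
              rw [show (nbrOffsets.map (fun o => ((p.1 + o.1, p.2 + o.2) : Int × Int))) =
                nbrs p from rfl]
              by_cases hm : c ∈ nbrs p
              · rw [if_pos hm, List.count_eq_one_of_mem (pv_nodup_nbrs p) hm]
              · rw [if_neg hm, List.count_eq_zero_of_not_mem hm]
            rw [hoc, hEqB c hcw hcfl, pv_nbT_append c hflp]
            have hsymm := pv_nbrs_symm p c
            by_cases hm : c ∈ nbrs p
            · rw [if_pos hm, if_pos (hsymm.1 hm)]
              push_cast
              omega
            · rw [if_neg hm, if_neg (fun h => hm (hsymm.2 h))]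
              push_cast
              omega
        have hflT1 : ∀ c ∈ fl ++ [p], c ∈ T := by
          intro c hc
          rcases List.mem_append.1 hc with hc | hc
          · exact hflT c hc
          · rw [List.mem_singleton.1 hc]
            exact hpT
        obtain ⟨ha, hb2, hc2⟩ := ih (fun q hq => hl q (by simp [hq])) _ (fl ++ [p]) (cnt + 1)
          true hInv1 hflT1
        refine ⟨ha, hb2, ?_⟩
        intro hc0
        exfalso
        obtain ⟨hr, _⟩ := hc2 hc0
        rw [hr] at hc0
        simp at hc0
      · have hg : (!(PySem.Set.contains fl p) &&
            (match get2 data p.2 p.1 with | some v => decide (v > 9) | none => false)) = false := by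
          rw [hmatch]
          simp [hcell]
        have hb : bstep (PySem.Set.ofList world) (data, fl, cnt, ch) p = (data, fl, cnt, ch) := by
          simp only [bstep]
          rw [hg]
          simp
        rw [hb]
        obtain ⟨ha, hb2, hc2⟩ := ih (fun q hq => hl q (by simp [hq])) data fl cnt ch
          ⟨hGd, hfn, hfw, hcnt, hEqB⟩ hflT
        refine ⟨ha, hb2, ?_⟩
        intro hc0
        obtain ⟨hr, hquiet⟩ := hc2 hc0
        refine ⟨hr, ?_⟩
        intro q hq
        rcases List.mem_cons.1 hq with rfl | hq'
        · exact Or.inr hcell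
        · exact hquiet q hq'

theorem pv_passLoop_char (data0 : List (List Int)) (world : List (Int × Int))
    (data : List (List Int)) (fl : List (Int × Int)) (cnt : Int) :
    InvB data0 world data fl cnt →
    ∃ F : List (Int × Int), F.Nodup ∧ (∀ c ∈ F, c ∈ world) ∧ ClosedW data0 world F ∧
      passLoop (PySem.Set.ofList world) world data fl cnt = (F.length : Int) ∧
      (∀ T, ClosedW data0 world T → (∀ c ∈ fl, c ∈ T) → ∀ c ∈ F, c ∈ T) := by
  have hTop : ClosedW data0 world (PySem.List.dedup world) :=
    fun c hc _ => (PySem.List.mem_dedup world c).2 hc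
  fun_induction passLoop (PySem.Set.ofList world) world data fl cnt with
  | case1 data fl cnt r hch ih =>
    intro hInv
    have hfld : ∀ c ∈ fl, c ∈ PySem.List.dedup world :=
      fun c hc => (PySem.List.mem_dedup world c).2 (hInv.2.2.1 c hc)
    have hsem := pv_pass_sem data0 world (PySem.List.dedup world) hTop world
      (fun p hp => hp) data fl cnt false hInv hfld
    obtain ⟨F, hFn, hFw, hFcl, hres, hforce⟩ := ih hsem.1
    refine ⟨F, hFn, hFw, hFcl, hres, ?_⟩
    intro T hT hfl
    have hsemT := pv_pass_sem data0 world T hT world (fun p hp => hp) data fl cnt false hInv hfl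
    exact hforce T hT hsemT.2.1
  | case2 data fl cnt r hch =>
    intro hInv
    have hfld : ∀ c ∈ fl, c ∈ PySem.List.dedup world :=
      fun c hc => (PySem.List.mem_dedup world c).2 (hInv.2.2.1 c hc)
    have hsem := pv_pass_sem data0 world (PySem.List.dedup world) hTop world
      (fun p hp => hp) data fl cnt false hInv hfld
    have hchf : (List.foldl (bstep (PySem.Set.ofList world)) (data, fl, cnt, false)
        world).2.2.2 = false := by
      have h : r.2.2.2 = false := by simpa using hch
      exact h
    obtain ⟨hr, hquiet⟩ := hsem.2.2 hchf
    obtain ⟨hGd, hfn, hfw, hcnt, hEqB⟩ := hInv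
    refine ⟨fl, hfn, hfw, ?_, ?_, fun T _ hfl => hfl⟩
    · intro c hcw hgt
      by_contra hcf
      have h := hEqB c hcw hcf
      rcases hquiet c hcw with h' | h'
      · exact hcf h'
      · rw [h] at h'
        exact h' hgt
    · show (onePass (PySem.Set.ofList world) world data fl cnt).2.2.1 = (fl.length : Int)
      show (List.foldl (bstep (PySem.Set.ofList world)) (data, fl, cnt, false) world).2.2.1 =
        (fl.length : Int)
      rw [hr]
      exact hcnt

-- initial states
theorem pv_initBump (world : List (Int × Int)) (l : List (Int × Int)) (hl : ∀ p ∈ l, p ∈ world) :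
    ∀ data : List (List Int), (∀ q ∈ world, InGrid data q) →
      (∀ q ∈ world, InGrid (l.foldl (fun d p => bump d p.2 p.1) data) q) ∧
      (∀ c ∈ world, cellD (l.foldl (fun d p => bump d p.2 p.1) data) 0 c =
        cellD data 0 c + (l.count c : Int)) := by
  induction l with
  | nil => exact fun data hGd => ⟨hGd, by simp⟩
  | cons p l ih =>
    intro data hGd
    have hpw : p ∈ world := hl p (by simp)
    have hGp : InGrid data p := hGd p hpw
    simp only [List.foldl_cons]
    rw [show bump data p.2 p.1 = set2 data p.2 p.1 (cellD data 0 p + 1) from pv_bump_eq hGp]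
    have hGd1 : ∀ q ∈ world, InGrid (set2 data p.2 p.1 (cellD data 0 p + 1)) q :=
      fun q hq => (pv_inGrid_set2 data p.2 p.1 _ q).2 (hGd q hq)
    obtain ⟨hg', hc'⟩ := ih (fun q hq => hl q (by simp [hq])) _ hGd1
    refine ⟨hg', ?_⟩
    intro c hcw
    rw [hc' c hcw]
    have hcell := pv_cellD_set2 (m := data) (p := p) c 0 (cellD data 0 p + 1) hGp
      (hGd c hcw).1 (hGd c hcw).2.1
    rw [hcell, List.count_cons]
    by_cases he : c = p
    · rw [if_pos he, he]
      simp only [BEq.rfl, if_true]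
      push_cast
      ring
    · rw [if_neg he]
      have hbe : ((p == c) : Bool) = false := by
        simp only [beq_eq_false_iff_ne, ne_eq]
        exact fun h => he h.symm
      rw [hbe]
      simp only [Bool.false_eq_true, if_false]
      push_cast
      ring

theorem pv_nbT_nil (c : Int × Int) : nbT [] c = 0 := by
  simp [nbT]

theorem flash_all_eq_aux (data : List (List Int)) (width height : Int)
    (world : List (Int × Int)) (hPre : Pre_flash_all data width height world) :
    flash_all data width height world = flash_all_alt data width height world := by
  have hpts : ∀ p ∈ world, 0 ≤ p.1 ∧ p.1 < width ∧ 0 ≤ p.2 ∧ p.2 < height := by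
    intro p hp
    obtain ⟨hx0, hxw, hy0, hyh, _, _⟩ := hPre p hp
    exact ⟨hx0, hxw, hy0, hyh⟩
  have hGd0 : ∀ p ∈ world, InGrid data p := by
    intro p hp
    obtain ⟨hx0, hxw, hy0, hyh, hyd, hxr⟩ := hPre p hp
    exact ⟨hx0, hy0, by omega, by omega⟩
  have hlen : ((PySem.List.pyRange 0 height 1).map
      (fun _ => List.replicate width.toNat false)).length = height.toNat := by
    simp [PySem.List.length_pyRange_one]
  have hrowval : ∀ j : Nat, j < height.toNat →
      ((PySem.List.pyRange 0 height 1).map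
        (fun _ => List.replicate width.toNat false)).getD j [] =
        List.replicate width.toNat false := by
    intro j hj
    have hj' : j < ((PySem.List.pyRange 0 height 1).map
        (fun _ => List.replicate width.toNat false)).length := by rw [hlen]; exact hj
    rw [List.getD_eq_getElem?_getD, List.getElem?_eq_getElem hj']
    simp
  have hGf0 : ∀ p ∈ world, InGrid ((PySem.List.pyRange 0 height 1).map
      (fun _ => List.replicate width.toNat false)) p := by
    intro p hp
    obtain ⟨hx0, hxw, hy0, hyh⟩ := hpts p hp
    refine ⟨hx0, hy0, by rw [hlen]; omega, ?_⟩
    rw [hrowval p.2.toNat (by omega)]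
    simp
    omega
  have hflag0 : ∀ p ∈ world, get2 ((PySem.List.pyRange 0 height 1).map
      (fun _ => List.replicate width.toNat false)) p.2 p.1 = some false := by
    intro p hp
    obtain ⟨hx0, hxw, hy0, hyh⟩ := hpts p hp
    rw [pv_get2_eq false (hGf0 p hp)]
    unfold cellD
    rw [hrowval p.2.toNat (by omega), List.getD_eq_getElem?_getD, List.getElem?_replicate]
    split <;> rfl
  have htrueW0 : trueW world ((PySem.List.pyRange 0 height 1).map
      (fun _ => List.replicate width.toNat false)) = [] := by
    apply List.filter_eq_nil_iff.2
    intro c hc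
    have hcw := (PySem.List.mem_dedup world c).1 hc
    rw [hflag0 c hcw]
    simp
  have hInvA0 : InvA data world data ((PySem.List.pyRange 0 height 1).map
      (fun _ => List.replicate width.toNat false)) world.reverse 0 := by
    refine ⟨hGd0, hGf0, by rw [htrueW0]; simp, ?_⟩
    intro c hc hcf
    rw [htrueW0]
    constructor
    · rw [List.count_reverse, pv_nbT_nil]
      unfold baseV
      push_cast
      ring
    · right
      rw [List.count_reverse]
      have hpos := List.count_pos_iff.2 hc
      omega
  obtain ⟨FA, hFAn, hFAw, hFAcl, hresA, hforceA⟩ :=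
    pv_loopA_char data world data _ world.reverse 0 hInvA0
  have hinit := pv_initBump world world (fun p hp => hp) data hGd0
  have hInvB0 : InvB data world (world.foldl (fun d p => bump d p.2 p.1) data) [] 0 := by
    refine ⟨hinit.1, List.nodup_nil, by simp, by simp, ?_⟩
    intro c hcw _
    rw [hinit.2 c hcw, pv_nbT_nil]
    unfold baseV
    push_cast
    ring
  obtain ⟨FB, hFBn, hFBw, hFBcl, hresB, hforceB⟩ :=
    pv_passLoop_char data world (world.foldl (fun d p => bump d p.2 p.1) data) [] 0 hInvB0
  have hAB : ∀ c ∈ FA, c ∈ FB := hforceA FB hFBcl (by rw [htrueW0]; simp)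
  have hBA : ∀ c ∈ FB, c ∈ FA := hforceB FA hFAcl (by simp)
  have hperm : FA.Perm FB := (List.perm_ext_iff_of_nodup hFAn hFBn).2
    (fun a => ⟨hAB a, hBA a⟩)
  show loopA world data ((PySem.List.pyRange 0 height 1).map
      (fun _ => List.replicate width.toNat false)) world.reverse 0 =
    passLoop (PySem.Set.ofList world) world
      (world.foldl (fun d p => bump d p.2 p.1) data) PySem.Set.empty 0
  rw [hresA, show (PySem.Set.empty : PySem.Set (Int × Int)) = ([] : List (Int × Int)) from rfl,
    hresB]
  exact_mod_cast congrArg Nat.cast hperm.length_eq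


-- ===== VERDICT (by name: the statement is the Claim_ definition above) =====
theorem flash_all_spec : Claim_equal_flash_all := by
  intro data width height world _ hPre
  show flash_all data width height world = flash_all_alt data width height world
  exact flash_all_eq_aux data width height world hPre
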